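-- pv_equiv track=rewrite | github.com/subrotonpi/clone_evaluation | data/gptcb_cross/gptcb_cross/None/1845.py | nthShortWord
-- ===== SOURCE A (Python) =====
-- def nthShortWord(words, n):
--     nthShortWord = 0
--     shortWord = "notFound"
--     for i in range(len(words)):
--         if len(words[i]) <= 3:
--             nthShortWord += 1;
--             if (nthShortWord == n):
--                 shortWord = words[i]
--                 break
--     return shortWord
-- ===== SOURCE B (Python) =====
-- def nthShortWord(words, n):
--     short = [w for w in words if len(w) <= 3]
--     if 1 <= n <= len(short):
--         return short[n - 1]
--     return "notFound"
-- ===== Notes on version B (the rewrite author's own statement) =====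
-- stated objective: simpler
-- what changed: Replaces the interleaved counter-and-early-break index scan with a filter-then-index decomposition: build the list of short words, then index it under an explicit 1 <= n <= count guard.
import Mathlib
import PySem

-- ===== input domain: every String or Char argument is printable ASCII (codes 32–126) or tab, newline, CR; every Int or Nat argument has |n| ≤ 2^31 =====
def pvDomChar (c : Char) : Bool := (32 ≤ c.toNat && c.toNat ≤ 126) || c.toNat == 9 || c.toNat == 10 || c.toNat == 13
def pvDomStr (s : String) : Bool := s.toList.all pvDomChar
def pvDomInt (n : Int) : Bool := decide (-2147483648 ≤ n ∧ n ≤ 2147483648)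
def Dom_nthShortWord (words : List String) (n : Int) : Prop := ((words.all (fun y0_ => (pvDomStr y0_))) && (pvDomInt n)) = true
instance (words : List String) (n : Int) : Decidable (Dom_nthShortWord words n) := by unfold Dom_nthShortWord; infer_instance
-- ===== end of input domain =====

-- B replaces A's counter-and-early-break scan by a filter-then-index decomposition (objective: simpler).

-- ===== PORT A =====
-- index loop over range(len(words)) with a counter and early break
def nthShortWordGo (words : List String) (n : Int) (i : Nat) (c : Int) : String :=
  if h : i < words.length then
    let w := words[i]
    if w.length ≤ 3 then
      if c + 1 = n then w
      else nthShortWordGo words n (i + 1) (c + 1)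
    else nthShortWordGo words n (i + 1) c
  else "notFound"
termination_by words.length - i

def nthShortWord (words : List String) (n : Int) : String :=
  nthShortWordGo words n 0 0

-- ===== PORT B =====
def nthShortWord_alt (words : List String) (n : Int) : String :=
  let short := words.filter (fun w => w.length ≤ 3)
  if 1 ≤ n ∧ n ≤ (short.length : Int) then short.getD (n - 1).toNat "notFound"
  else "notFound"

-- ===== PRECONDITION & SPEC =====
def Spec_nthShortWord (words : List String) (n : Int) (out : String) : Prop := out = nthShortWord_alt words n
instance (words : List String) (n : Int) (out : String) : Decidable (Spec_nthShortWord words n out) := by unfold Spec_nthShortWord; infer_instance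

-- ===== CLAIM (what is proved, stated in full; the proofs are below) =====
def Claim_equal_nthShortWord : Prop := ∀ (words : List String) (n : Int), Dom_nthShortWord words n → Spec_nthShortWord words n (nthShortWord words n)

-- ===== LEMMAS AND PROOFS =====

-- proof-only reformulation of A's loop as structural recursion on the remaining suffix
def loopL : List String → Int → Int → String
  | [], _, _ => "notFound"
  | w :: ws, n, c =>
    if w.length ≤ 3 then
      if c + 1 = n then w else loopL ws n (c + 1)
    else loopL ws n c

theorem go_eq_loop (words : List String) (n : Int) :
    ∀ (i : Nat) (c : Int), nthShortWordGo words n i c = loopL (words.drop i) n c := by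
  intro i c
  generalize hm : words.length - i = m
  induction m generalizing i c with
  | zero =>
    have hi : words.length ≤ i := by omega
    rw [nthShortWordGo, dif_neg (by omega), List.drop_eq_nil_of_le hi, loopL]
  | succ m ih =>
    have hi : i < words.length := by omega
    rw [nthShortWordGo, dif_pos hi, List.drop_eq_getElem_cons hi, loopL]
    by_cases hw : (words[i]).length ≤ 3
    · rw [if_pos hw, if_pos hw]
      by_cases hn : c + 1 = n
      · rw [if_pos hn, if_pos hn]
      · rw [if_neg hn, if_neg hn, ih (i + 1) (c + 1) (by omega)]
    · rw [if_neg hw, if_neg hw, ih (i + 1) c (by omega)]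

theorem loop_eq_filter (l : List String) :
    ∀ (n c : Int),
      loopL l n c =
        (if 1 ≤ n - c ∧ n - c ≤ ((l.filter (fun w => w.length ≤ 3)).length : Int) then
          (l.filter (fun w => w.length ≤ 3)).getD (n - c - 1).toNat "notFound"
        else "notFound") := by
  induction l with
  | nil =>
    intro n c
    simp only [loopL, List.filter_nil, List.length_nil]
    rw [if_neg (by push_cast; omega)]
  | cons w ws ih =>
    intro n c
    by_cases hw : w.length ≤ 3
    · rw [loopL, if_pos hw, List.filter_cons_of_pos (by simpa using hw)]
      by_cases hn : c + 1 = n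
      · have h1 : n - c = 1 := by omega
        rw [if_pos hn, if_pos (by constructor <;> [omega; (simp only [List.length_cons]; push_cast; omega)])]
        simp [h1]
      · rw [if_neg hn, ih n (c + 1)]
        by_cases hle : 1 ≤ n - c ∧ n - c ≤ ((w :: ws.filter (fun w => w.length ≤ 3)).length : Int)
        · have h2 : 2 ≤ n - c := by omega
          rw [if_pos (by obtain ⟨h1, h2⟩ := hle; simp only [List.length_cons] at h2; push_cast at h2 ⊢; omega), if_pos hle]
          have ht : (n - c - 1).toNat = (n - (c + 1) - 1).toNat + 1 := by omega
          rw [ht]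
          simp
        · rw [if_neg (by simp only [List.length_cons, not_and, not_le] at hle ⊢; push_cast at hle ⊢; omega), if_neg hle]
    · rw [loopL, if_neg hw, List.filter_cons_of_neg (by simpa using hw), ih n c]

-- ===== VERDICT (by name: the statement is the Claim_ definition above) =====
theorem nthShortWord_spec : Claim_equal_nthShortWord := by
  intro words n _
  unfold Spec_nthShortWord nthShortWord nthShortWord_alt
  rw [go_eq_loop words n 0 0, List.drop_zero, loop_eq_filter]
  norm_num
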